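-- pv_equiv track=rewrite | github.com/mayarmas/Ai-Project | ai_project.py | generate_ordered_schedule
-- ===== SOURCE A (Python) =====
-- from typing import List, Tuple
--
-- def generate_ordered_schedule(jobs: List[List[Tuple[str, int]]]) -> List[Tuple[int, str, int]]:
--     all_operations = []
--     for job_index, job in enumerate(jobs):
--         for operation_index, (machine, time) in enumerate(job):
--             all_operations.append((job_index, machine, time, operation_index))
--     # Sort the operations based on their position within the job
--     all_operations.sort(key=lambda x: x[3])
--     # Remove the operation index from the tuples
--     ordered_schedule = [(job_index, machine, time) for job_index, machine, time, _ in all_operations]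
--     return ordered_schedule
-- ===== SOURCE B (Python) =====
-- from typing import List, Tuple
--
-- def generate_ordered_schedule(jobs: List[List[Tuple[str, int]]]) -> List[Tuple[int, str, int]]:
--     # Bucket/round-robin by position within job: emit all 0th operations (in job
--     # order), then all 1st operations, ... -- no sort needed, O(n).
--     m = max(map(len, jobs), default=0)
--     out = []
--     for k in range(m):
--         for ji, job in enumerate(jobs):
--             if k < len(job):
--                 machine, time = job[k]
--                 out.append((ji, machine, time))
--     return out
-- ===== Notes on version B (the rewrite author's own statement) =====
-- stated objective: alternative
-- what changed: Replaces flatten-then-stable-sort-by-operation-index with a round-robin bucket pass (emit every job's 0th operation in job order, then every 1st, ...), eliminating the sort; measured ~1.3x faster at the largest timed size, below the 1.5x bar, so no speed claim.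
import Mathlib
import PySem

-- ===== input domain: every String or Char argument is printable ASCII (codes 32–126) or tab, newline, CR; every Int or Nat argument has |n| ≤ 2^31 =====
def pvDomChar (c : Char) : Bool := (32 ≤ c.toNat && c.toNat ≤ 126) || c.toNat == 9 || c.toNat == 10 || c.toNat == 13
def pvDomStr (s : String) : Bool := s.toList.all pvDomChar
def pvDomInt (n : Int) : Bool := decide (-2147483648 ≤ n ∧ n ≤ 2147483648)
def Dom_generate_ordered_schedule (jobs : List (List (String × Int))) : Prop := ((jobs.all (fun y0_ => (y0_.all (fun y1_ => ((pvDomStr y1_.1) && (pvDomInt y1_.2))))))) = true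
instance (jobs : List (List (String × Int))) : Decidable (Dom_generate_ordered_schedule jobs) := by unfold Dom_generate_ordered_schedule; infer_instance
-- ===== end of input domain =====

-- B replaces A's flatten-then-stable-sort-by-operation-index with a round-robin bucket
-- pass (all 0th operations in job order, then all 1st, ...): same output without sorting.

-- ===== PORT A =====
def generate_ordered_schedule (jobs : List (List (String × Int))) : List (Int × String × Int) :=
  (PySem.List.sorted
    ((PySem.List.enumerate jobs).flatMap (fun p =>
      (PySem.List.enumerate p.2).map (fun q => (p.1, q.2.1, q.2.2, q.1))))
    (fun x => x.2.2.2) false).map (fun x => (x.1, x.2.1, x.2.2.1))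

-- ===== PORT B =====
def generate_ordered_schedule_alt (jobs : List (List (String × Int))) : List (Int × String × Int) :=
  (List.range (jobs.foldl (fun acc j => max acc j.length) 0)).flatMap (fun k =>
    (PySem.List.enumerate jobs).filterMap (fun p =>
      (p.2[k]?).map (fun mt => (p.1, mt.1, mt.2))))

-- ===== PRECONDITION & SPEC =====
def Spec_generate_ordered_schedule (jobs : List (List (String × Int))) (out : List (Int × String × Int)) : Prop := out = generate_ordered_schedule_alt jobs
instance (jobs : List (List (String × Int))) (out : List (Int × String × Int)) : Decidable (Spec_generate_ordered_schedule jobs out) := by unfold Spec_generate_ordered_schedule; infer_instance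

-- ===== CLAIM (what is proved, stated in full; the proofs are below) =====
def Claim_equal_generate_ordered_schedule : Prop := ∀ (jobs : List (List (String × Int))), Dom_generate_ordered_schedule jobs → Spec_generate_ordered_schedule jobs (generate_ordered_schedule jobs)

-- ===== LEMMAS AND PROOFS =====

-- insertBy passes over a prefix none of whose elements come after x
theorem insertBy_append_not_before {α : Type} (before : α → α → Bool) (x : α)
    (L1 L2 : List α) (h : ∀ y ∈ L1, before x y = false) :
    PySem.List.insertBy before x (L1 ++ L2) = L1 ++ PySem.List.insertBy before x L2 := by
  induction L1 with
  | nil => simp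
  | cons a L1 ih =>
    have ha := h a (by simp)
    simp [PySem.List.insertBy, ha, ih (fun y hy => h y (by simp [hy]))]

-- inserting x (key v) into a bucket concatenation appends it to bucket v
theorem insertBy_flatMap_range {α : Type} (key : α → Int) (m v : Nat) (hv : v < m)
    (x : α) (hx : key x = (v : Int)) (bs : Nat → List α)
    (hb : ∀ k, k < m → ∀ y ∈ bs k, key y = (k : Int)) :
    PySem.List.insertBy (fun a b => decide (key a < key b)) x ((List.range m).flatMap bs)
      = (List.range m).flatMap (fun k => if k = v then bs k ++ [x] else bs k) := by
  have hm : m = (v + 1) + (m - (v + 1)) := by omega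
  rw [hm, List.range_add, List.range_succ, List.flatMap_append, List.flatMap_append]
  rw [insertBy_append_not_before]
  · rw [List.flatMap_append, List.flatMap_append]
    have hS : PySem.List.insertBy (fun a b => decide (key a < key b)) x
        (((List.range (m - (v + 1))).map (v + 1 + ·)).flatMap bs)
        = x :: ((List.range (m - (v + 1))).map (v + 1 + ·)).flatMap bs := by
      cases hScase : ((List.range (m - (v + 1))).map (v + 1 + ·)).flatMap bs with
      | nil => simp [PySem.List.insertBy]
      | cons s S' =>
        have hs : s ∈ ((List.range (m - (v + 1))).map (v + 1 + ·)).flatMap bs := by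
          rw [hScase]; simp
        rw [List.mem_flatMap] at hs
        obtain ⟨k, hk, hsk⟩ := hs
        simp only [List.mem_map, List.mem_range] at hk
        obtain ⟨j, hj, rfl⟩ := hk
        have hkey := hb _ (by omega) s hsk
        have : decide (key x < key s) = true := by
          rw [hx, hkey]; simp; omega
        simp [PySem.List.insertBy, this]
    rw [hS]
    have h1 : (List.range v).flatMap (fun k => if k = v then bs k ++ [x] else bs k)
        = (List.range v).flatMap bs := by
      refine List.flatMap_congr (fun k hk => ?_)
      rw [List.mem_range] at hk
      rw [if_neg (by omega)]
    have h2 : ((List.range (m - (v + 1))).map (v + 1 + ·)).flatMap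
          (fun k => if k = v then bs k ++ [x] else bs k)
        = ((List.range (m - (v + 1))).map (v + 1 + ·)).flatMap bs := by
      refine List.flatMap_congr (fun k hk => ?_)
      simp only [List.mem_map, List.mem_range] at hk
      obtain ⟨j, hj, rfl⟩ := hk
      rw [if_neg (by omega)]
    rw [h1, h2]
    simp
  · intro y hy
    rw [List.mem_append] at hy
    have hkey : ∃ k, k ≤ v ∧ key y = (k : Int) := by
      rcases hy with hy | hy
      · rw [List.mem_flatMap] at hy
        obtain ⟨k, hk, hyk⟩ := hy
        rw [List.mem_range] at hk
        exact ⟨k, by omega, hb k (by omega) y hyk⟩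
      · simp only [List.flatMap_cons, List.flatMap_nil, List.append_nil] at hy
        exact ⟨v, le_refl v, hb v hv y hy⟩
    obtain ⟨k, hk, hkey⟩ := hkey
    rw [hx, hkey]
    simp; omega

-- a stable sort by an Int key bounded in [0, m) is the concatenation of the key buckets
theorem sorted_buckets {α : Type} (key : α → Int) (m : Nat) (xs : List α)
    (h : ∀ x ∈ xs, 0 ≤ key x ∧ key x < (m : Int)) :
    PySem.List.sorted xs key false
      = (List.range m).flatMap (fun (k : Nat) => xs.filter (fun x => decide (key x = (k : Int)))) := by
  induction xs using List.reverseRecOn with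
  | nil => simp [PySem.List.sorted_eq_foldl_insertBy]
  | append_singleton ys x ih =>
    have hys : ∀ y ∈ ys, 0 ≤ key y ∧ key y < (m : Int) := fun y hy => h y (by simp [hy])
    have hx := h x (by simp)
    rw [PySem.List.sorted_eq_foldl_insertBy, List.foldl_append, List.foldl_cons, List.foldl_nil,
        ← PySem.List.sorted_eq_foldl_insertBy, ih hys]
    set v : Nat := (key x).toNat with hvdef
    have hxv : key x = (v : Int) := by omega
    have hvm : v < m := by omega
    rw [insertBy_flatMap_range key m v hvm x hxv
        (fun k => ys.filter (fun y => decide (key y = (k : Int))))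
        (fun k hk y hy => by
          rw [List.mem_filter] at hy
          exact of_decide_eq_true hy.2)]
    refine List.flatMap_congr (fun k _ => ?_)
    rw [List.filter_append]
    by_cases hkv : k = v
    · subst hkv
      rw [if_pos rfl]
      simp [hxv]
    · rw [if_neg hkv]
      have : decide (key x = (k : Int)) = false := by
        simp [hxv]; omega
      simp [this]

-- filtering an enumeration for one index yields that element (if present)
theorem enumerate_filter_eq {β : Type} (xs : List β) : ∀ (s i : Int),
    (PySem.List.enumerate xs s).filter (fun p => decide (p.1 = i))
      = ((if s ≤ i then xs[(i - s).toNat]? else none).map (fun v => (i, v))).toList := by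
  induction xs with
  | nil => intro s i; simp [PySem.List.enumerate]
  | cons x xs ih =>
    intro s i
    rw [PySem.List.enumerate_cons, List.filter_cons]
    by_cases hsi : s = i
    · subst hsi
      have hnone : (PySem.List.enumerate xs (s + 1)).filter (fun p => decide (p.1 = s))
          = [] := by
        rw [ih (s + 1) s, if_neg (by omega)]
        simp
      simp [hnone]
    · rw [ih (s + 1) i]
      have : (decide ((s, x).1 = i)) = false := by simp [hsi]
      rw [this]
      simp only [Bool.false_eq_true, if_false]
      by_cases hle : s ≤ i
      · have h1 : s + 1 ≤ i := by omega
        rw [if_pos h1, if_pos hle]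
        have h2 : (i - s).toNat = (i - (s + 1)).toNat + 1 := by omega
        rw [h2]
        simp
      · rw [if_neg (by omega), if_neg hle]

-- every member of an enumeration from 0 has index in [0, length) and value in the list
theorem mem_enumerate_zero_bounds {β : Type} (xs : List β) (q : Int × β)
    (hq : q ∈ PySem.List.enumerate xs 0) :
    (0 ≤ q.1 ∧ q.1 < (xs.length : Int)) ∧ q.2 ∈ xs := by
  constructor
  · have h1 : q.1 ∈ (PySem.List.enumerate xs 0).map (·.1) := List.mem_map_of_mem hq
    rw [PySem.List.map_fst_enumerate] at h1
    rw [PySem.List.mem_pyRange_one] at h1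
    omega
  · have h2 : q.2 ∈ (PySem.List.enumerate xs 0).map (·.2) := List.mem_map_of_mem hq
    rwa [PySem.List.map_snd_enumerate] at h2

-- ===== VERDICT (by name: the statement is the Claim_ definition above) =====
theorem generate_ordered_schedule_spec : Claim_equal_generate_ordered_schedule := by
  intro jobs _
  unfold Spec_generate_ordered_schedule generate_ordered_schedule generate_ordered_schedule_alt
  set M : Nat := jobs.foldl (fun acc j => max acc j.length) 0 with hMdef
  have hMle : ∀ j ∈ jobs, j.length ≤ M := by
    have := PySem.List.le_foldl_max_nat jobs List.length 0
    exact this.2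
  set allOps := (PySem.List.enumerate jobs).flatMap (fun p =>
    (PySem.List.enumerate p.2).map (fun q => (p.1, q.2.1, q.2.2, q.1))) with hallOps
  have hbound : ∀ x ∈ allOps, 0 ≤ x.2.2.2 ∧ x.2.2.2 < (M : Int) := by
    intro x hx
    rw [hallOps, List.mem_flatMap] at hx
    obtain ⟨p, hp, hxp⟩ := hx
    rw [List.mem_map] at hxp
    obtain ⟨q, hq, rfl⟩ := hxp
    obtain ⟨⟨hq0, hqlen⟩, -⟩ := mem_enumerate_zero_bounds p.2 q hq
    have hjob : p.2 ∈ jobs := (mem_enumerate_zero_bounds jobs p hp).2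
    have := hMle p.2 hjob
    simp only []
    constructor
    · exact hq0
    · have : (p.2.length : Int) ≤ (M : Int) := by exact_mod_cast this
      omega
  rw [sorted_buckets (fun x => x.2.2.2) M allOps hbound, List.map_flatMap]
  refine List.flatMap_congr (fun k _ => ?_)
  rw [List.filterMap_eq_flatMap_toList, hallOps, List.filter_flatMap, List.map_flatMap]
  refine List.flatMap_congr (fun p _ => ?_)
  rw [List.filter_map, List.map_map]
  have he := enumerate_filter_eq p.2 0 (k : Int)
  have hcomp : ((fun (x : Int × String × Int × Int) => decide (x.2.2.2 = (k : Int))) ∘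
      (fun (q : Int × (String × Int)) => (p.1, q.2.1, q.2.2, q.1)))
      = (fun (r : Int × (String × Int)) => decide (r.1 = (k : Int))) := by
    funext q; rfl
  rw [hcomp, he, if_pos (by omega)]
  have hk : ((k : Int) - 0).toNat = k := by omega
  rw [hk]
  cases p.2[k]? with
  | none => simp
  | some mt => simp
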